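-- pv_equiv track=rewrite | github.com/mosheng20205/demand_radar | radar/notify.py | _status_overview
-- ===== SOURCE A (Python) =====
-- from collections import Counter, defaultdict
--
-- def _status_overview(source_runs: list[tuple[str, str, int]]) -> str:
--     totals: dict[str, int] = defaultdict(int)
--     for _, status, count in source_runs:
--         totals[str(status)] += int(count or 0)
--     if not totals:
--         return "暂无运行记录"
--     parts = [f"{status} {totals[status]}" for status in sorted(totals)]
--     return " | ".join(parts)
-- ===== SOURCE B (Python) =====
-- from itertools import groupby
--
--
-- def _status_overview(source_runs: list[tuple[str, str, int]]) -> str: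
--     if not source_runs:
--         return "暂无运行记录"
--     runs = sorted(source_runs, key=lambda r: str(r[1]))
--     parts = []
--     for status, grp in groupby(runs, key=lambda r: str(r[1])):
--         total = sum(int(r[2] or 0) for r in grp)
--         parts.append(f"{status} {total}")
--     return " | ".join(parts)
-- ===== Notes on version B (the rewrite author's own statement) =====
-- stated objective: alternative
-- what changed: Replaces A's hash-aggregate-into-a-dict-then-sort-keys with sorting the runs by status first and emitting each status's sum in a single groupby-style pass over the sorted list.
import Mathlib
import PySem

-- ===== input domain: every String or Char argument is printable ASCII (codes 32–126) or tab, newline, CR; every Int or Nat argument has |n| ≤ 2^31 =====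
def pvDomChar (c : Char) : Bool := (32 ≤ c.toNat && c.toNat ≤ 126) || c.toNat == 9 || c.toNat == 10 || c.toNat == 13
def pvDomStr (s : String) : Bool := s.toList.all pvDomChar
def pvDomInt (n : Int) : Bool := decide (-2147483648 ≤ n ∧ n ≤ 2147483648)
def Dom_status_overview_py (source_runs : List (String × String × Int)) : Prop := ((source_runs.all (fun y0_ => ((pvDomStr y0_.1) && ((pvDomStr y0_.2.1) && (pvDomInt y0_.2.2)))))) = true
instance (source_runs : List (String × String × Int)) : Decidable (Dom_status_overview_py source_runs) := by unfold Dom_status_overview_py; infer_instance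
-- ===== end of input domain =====

-- B sorts the runs by status and emits each group's sum in one grouped pass (sort + groupby)
-- instead of A's hash-aggregate-then-sort; objective: alternative decomposition, same cost.


-- ===== PORT A =====
-- totals[str(status)] += int(count or 0); 'count or 0' is count unless count == 0
def status_overview_py (source_runs : List (String × String × Int)) : String :=
  let totals : PySem.Dict String Int :=
    source_runs.foldl
      (fun d r => d.modify r.2.1 0 (fun v => v + (if r.2.2 == 0 then 0 else r.2.2)))
      PySem.Dict.empty
  if totals.size == 0 then "暂无运行记录"
  else
    let parts := (PySem.List.sorted totals.keys (fun k => k) false).map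
      (fun status => status ++ " " ++ PySem.Int.toStr (totals.getD status 0))
    PySem.Str.join " | " parts

-- ===== PORT B =====
-- itertools.groupby over the status-sorted runs: emit "status sum" per maximal run of equal keys
def pvGroupParts : List (String × String × Int) → List String
  | [] => []
  | r :: rest =>
      let s := r.2.1
      let grp := r :: rest.takeWhile (fun q => q.2.1 == s)
      let tot := (grp.map (fun q => if q.2.2 == 0 then (0 : Int) else q.2.2)).sum
      (s ++ " " ++ PySem.Int.toStr tot) :: pvGroupParts (rest.dropWhile (fun q => q.2.1 == s))
termination_by l => l.length
decreasing_by
  simp only [List.length_cons]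
  exact Nat.lt_succ_of_le (List.length_dropWhile_le _ _)

def status_overview_py_alt (source_runs : List (String × String × Int)) : String :=
  if source_runs.isEmpty then "暂无运行记录"
  else
    let runs := PySem.List.sorted source_runs (fun r => r.2.1) false
    PySem.Str.join " | " (pvGroupParts runs)

-- ===== PRECONDITION & SPEC =====
def Spec_status_overview_py (source_runs : List (String × String × Int)) (out : String) : Prop := out = status_overview_py_alt source_runs
instance (source_runs : List (String × String × Int)) (out : String) : Decidable (Spec_status_overview_py source_runs out) := by unfold Spec_status_overview_py; infer_instance

-- ===== CLAIM (what is proved, stated in full; the proofs are below) =====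
def Claim_equal_status_overview_py : Prop := ∀ (source_runs : List (String × String × Int)), Dom_status_overview_py source_runs → Spec_status_overview_py source_runs (status_overview_py source_runs)

-- ===== LEMMAS AND PROOFS =====

-- total count credited to status k (with Python's 'count or 0' coercion)
def pvTot (src : List (String × String × Int)) (k : String) : Int :=
  ((src.filter (fun r => r.2.1 == k)).map (fun q => if q.2.2 == 0 then (0 : Int) else q.2.2)).sum

-- the list of group keys produced by pvGroupParts, in order
def pvKeys : List (String × String × Int) → List String
  | [] => []
  | r :: rest => r.2.1 :: pvKeys (rest.dropWhile (fun q => q.2.1 == r.2.1))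
termination_by l => l.length
decreasing_by
  simp only [List.length_cons]
  exact Nat.lt_succ_of_le (List.length_dropWhile_le _ _)

theorem pvTot_perm {a b : List (String × String × Int)} (h : a.Perm b) (k : String) :
    pvTot a k = pvTot b k := by
  exact List.Perm.sum_eq (List.Perm.map _ (List.Perm.filter _ h))

theorem totals_getD (src : List (String × String × Int)) (d : PySem.Dict String Int) (k : String) :
    (src.foldl (fun d r => d.modify r.2.1 0 (fun v => v + (if r.2.2 == 0 then 0 else r.2.2))) d).getD k 0
      = d.getD k 0 + pvTot src k := by
  induction src generalizing d with
  | nil => simp [pvTot]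
  | cons r rest ih =>
    simp only [List.foldl_cons, ih]
    by_cases hk : k = r.2.1
    · subst hk
      simp [pvTot]
      ring
    · have : (r.2.1 == k) = false := by simp; exact fun h => hk h.symm
      simp [PySem.Dict.getD_modify, hk, pvTot, this]

theorem mem_pvKeys {l : List (String × String × Int)} {k : String} (h : k ∈ pvKeys l) :
    ∃ q ∈ l, q.2.1 = k := by
  induction l using pvKeys.induct with
  | case1 => simp [pvKeys] at h
  | case2 r rest ih =>
    rw [pvKeys] at h
    rcases List.mem_cons.1 h with h | h
    · exact ⟨r, List.mem_cons_self, h.symm⟩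
    · obtain ⟨q, hq, hqk⟩ := ih h
      exact ⟨q, List.mem_cons_of_mem _ ((rest.dropWhile_sublist _).mem hq), hqk⟩

theorem mem_pvKeys_of_mem {l : List (String × String × Int)} {q : String × String × Int}
    (h : q ∈ l) : q.2.1 ∈ pvKeys l := by
  induction l using pvKeys.induct with
  | case1 => simp at h
  | case2 r rest ih =>
    rw [pvKeys]
    rcases List.mem_cons.1 h with h | h
    · subst h; exact List.mem_cons_self
    · by_cases hs : q.2.1 = r.2.1
      · simp [hs]
      · refine List.mem_cons_of_mem _ (ih ?_)
        have hsplit := List.takeWhile_append_dropWhile (p := fun (q : String × String × Int) => q.2.1 == r.2.1) (l := rest)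
        rcases List.mem_append.1 (by rw [hsplit]; exact h) with h' | h'
        · exact absurd (by simpa [beq_iff_eq] using List.mem_takeWhile_imp h') hs
        · exact h'

theorem pvKeys_pairwise {l : List (String × String × Int)}
    (h : l.Pairwise (fun a b => a.2.1 ≤ b.2.1)) : (pvKeys l).Pairwise (· < ·) := by
  induction l using pvKeys.induct with
  | case1 => simp [pvKeys]
  | case2 r rest ih =>
    rw [pvKeys]
    have hrest : rest.Pairwise (fun a b => a.2.1 ≤ b.2.1) := (List.pairwise_cons.1 h).2
    have hhead : ∀ q ∈ rest, r.2.1 ≤ q.2.1 := (List.pairwise_cons.1 h).1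
    have hdropPW : (rest.dropWhile (fun q => q.2.1 == r.2.1)).Pairwise (fun a b => a.2.1 ≤ b.2.1) :=
      List.Pairwise.sublist (rest.dropWhile_sublist _) hrest
    refine List.pairwise_cons.2 ⟨?_, ih hdropPW⟩
    intro k hk
    obtain ⟨q, hq, hqk⟩ := mem_pvKeys hk
    subst hqk
    -- every element surviving dropWhile has key > r.2.1
    rcases hdw : rest.dropWhile (fun q => q.2.1 == r.2.1) with _ | ⟨q0, tl⟩
    · rw [hdw] at hq; simp at hq
    · have hq0mem : q0 ∈ rest := (rest.dropWhile_sublist _).mem (by rw [hdw]; exact List.mem_cons_self)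
      have hq0ne : ¬ (q0.2.1 = r.2.1) := by
        have := List.head?_dropWhile_not (p := fun (q : String × String × Int) => q.2.1 == r.2.1) (l := rest)
        rw [hdw] at this
        simpa [beq_iff_eq] using this
      have hq0gt : r.2.1 < q0.2.1 := lt_of_le_of_ne (hhead q0 hq0mem) (fun h => hq0ne h.symm)
      rw [hdw] at hq
      rcases List.mem_cons.1 hq with h' | h'
      · subst h'; exact hq0gt
      · have hpwtl := List.pairwise_cons.1 (hdw ▸ hdropPW)
        exact lt_of_lt_of_le hq0gt (hpwtl.1 q h')

theorem pvGroupParts_eq {l : List (String × String × Int)}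
    (h : l.Pairwise (fun a b => a.2.1 ≤ b.2.1)) :
    pvGroupParts l = (pvKeys l).map (fun k => k ++ " " ++ PySem.Int.toStr (pvTot l k)) := by
  induction l using pvKeys.induct with
  | case1 => simp [pvGroupParts, pvKeys]
  | case2 r rest ih =>
    have hrest : rest.Pairwise (fun a b => a.2.1 ≤ b.2.1) := (List.pairwise_cons.1 h).2
    have hhead : ∀ q ∈ rest, r.2.1 ≤ q.2.1 := (List.pairwise_cons.1 h).1
    set t1 := rest.takeWhile (fun q => q.2.1 == r.2.1) with ht1
    set t2 := rest.dropWhile (fun q => q.2.1 == r.2.1) with ht2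
    have hsplit : rest = t1 ++ t2 := (List.takeWhile_append_dropWhile ..).symm
    have hdropPW : t2.Pairwise (fun a b => a.2.1 ≤ b.2.1) :=
      List.Pairwise.sublist (rest.dropWhile_sublist _) hrest
    have ht2gt : ∀ q ∈ t2, r.2.1 < q.2.1 := by
      intro q hq
      rcases hdw : t2 with _ | ⟨q0, tl⟩
      · rw [hdw] at hq; simp at hq
      · have hq0mem : q0 ∈ rest := (rest.dropWhile_sublist _).mem (by rw [← ht2, hdw]; exact List.mem_cons_self)
        have hq0ne : ¬ (q0.2.1 = r.2.1) := by
          have := List.head?_dropWhile_not (p := fun (q : String × String × Int) => q.2.1 == r.2.1) (l := rest)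
          rw [← ht2, hdw] at this
          simpa [beq_iff_eq] using this
        have hq0gt : r.2.1 < q0.2.1 := lt_of_le_of_ne (hhead q0 hq0mem) (fun h => hq0ne h.symm)
        rw [hdw] at hq
        rcases List.mem_cons.1 hq with h' | h'
        · subst h'; exact hq0gt
        · have hle : q0.2.1 ≤ q.2.1 := by
            have := List.pairwise_cons.1 (by rw [hdw] at hdropPW; exact hdropPW)
            exact this.1 q h'
          exact lt_of_lt_of_le hq0gt hle
    -- the head group's sum equals pvTot of the whole list at r.2.1
    have htothead : ((r :: t1).map (fun q => if q.2.2 == 0 then (0 : Int) else q.2.2)).sum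
        = pvTot (r :: rest) r.2.1 := by
      have h1 : ∀ q ∈ t1, (q.2.1 == r.2.1) = true := fun q hq => List.mem_takeWhile_imp (p := fun (q : String × String × Int) => q.2.1 == r.2.1) (ht1 ▸ hq)
      have ht1f : t1.filter (fun q => q.2.1 == r.2.1) = t1 := List.filter_eq_self.2 h1
      have ht2f : t2.filter (fun q => q.2.1 == r.2.1) = [] := by
        refine List.filter_eq_nil_iff.2 ?_
        intro q hq
        simp only [beq_iff_eq]
        exact fun h => absurd (ht2gt q hq) (by rw [h]; exact lt_irrefl _)
      rw [pvTot]
      conv_rhs => rw [hsplit]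
      simp [List.filter_append, ht1f, ht2f]
    -- pvTot agrees between l and t2 on every key of pvKeys t2
    have htott2 : ∀ k ∈ pvKeys t2, pvTot (r :: rest) k = pvTot t2 k := by
      intro k hk
      obtain ⟨q, hq, hqk⟩ := mem_pvKeys hk
      have hkgt : r.2.1 < k := hqk ▸ ht2gt q hq
      have hkr : (r.2.1 == k) = false := by simp; exact ne_of_lt hkgt
      have ht1f : t1.filter (fun p => p.2.1 == k) = [] := by
        refine List.filter_eq_nil_iff.2 ?_
        intro p hp
        have : p.2.1 = r.2.1 := by simpa [beq_iff_eq] using List.mem_takeWhile_imp (p := fun (q : String × String × Int) => q.2.1 == r.2.1) (ht1 ▸ hp)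
        simp only [beq_iff_eq, this]
        exact ne_of_lt hkgt
      rw [pvTot, pvTot]
      conv_lhs => rw [hsplit]
      simp [List.filter_append, ht1f, hkr]
    rw [pvKeys]
    simp only [pvGroupParts, List.map_cons]
    refine congrArg₂ List.cons ?_ ?_
    · simp only [← htothead, List.map_cons]
      rw [← ht1]
    · rw [ih hdropPW]
      exact (List.map_congr_left (fun k hk => by rw [htott2 k hk])).symm

theorem totals_keys (src : List (String × String × Int)) :
    (src.foldl (fun d r => d.modify r.2.1 0 (fun v => v + (if r.2.2 == 0 then 0 else r.2.2))) PySem.Dict.empty).keys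
      = PySem.Set.ofList (src.map (fun r => r.2.1)) := by
  rw [PySem.Dict.keys_foldl_modify_key]
  simp [PySem.Set.update_nil_left]

theorem pvKeys_eq_sorted {src : List (String × String × Int)} :
    PySem.List.sorted (PySem.Set.ofList (src.map (fun r => r.2.1))) (fun k => k) false
      = pvKeys (PySem.List.sorted src (fun r => r.2.1) false) := by
  set l := PySem.List.sorted src (fun r => r.2.1) false with hl
  have hperm : l.Perm src := PySem.List.sorted_perm ..
  have hpw : l.Pairwise (fun a b => a.2.1 ≤ b.2.1) := PySem.List.sorted_pairwise ..
  have hlt : (pvKeys l).Pairwise (· < ·) := pvKeys_pairwise hpw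
  refine PySem.List.sorted_eq_of_perm_of_pairwise_lt _ _ _ ?_ hlt
  refine (List.perm_ext_iff_of_nodup hlt.nodup (PySem.Set.nodup_ofList _)).2 ?_
  intro k
  rw [PySem.Set.mem_ofList]
  constructor
  · intro hk
    obtain ⟨q, hq, hqk⟩ := mem_pvKeys hk
    exact hqk ▸ List.mem_map_of_mem (hperm.mem_iff.1 hq)
  · intro hk
    obtain ⟨q, hq, hqk⟩ := List.mem_map.1 hk
    exact hqk ▸ mem_pvKeys_of_mem (hperm.mem_iff.2 hq)

-- ===== VERDICT (by name: the statement is the Claim_ definition above) =====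
theorem status_overview_py_spec : Claim_equal_status_overview_py := by
  intro src _
  unfold Spec_status_overview_py
  simp only [status_overview_py, status_overview_py_alt]
  rcases src with _ | ⟨r0, rest0⟩
  · simp [PySem.Dict.size, PySem.Dict.empty]
  set src := r0 :: rest0 with hsrc
  set totals := src.foldl (fun d r => d.modify r.2.1 0 (fun v => v + (if r.2.2 == 0 then 0 else r.2.2))) PySem.Dict.empty with htotals
  have hkeys : totals.keys = PySem.Set.ofList (src.map (fun r => r.2.1)) := totals_keys src
  have hkeysne : totals.keys ≠ [] := by
    rw [hkeys]
    intro hempty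
    have : r0.2.1 ∈ PySem.Set.ofList (src.map (fun r => r.2.1)) := by
      rw [PySem.Set.mem_ofList]; exact List.mem_map_of_mem (by simp [hsrc])
    rw [hempty] at this; simp at this
  have hsize : (totals.size == 0) = false := by
    have : totals.size = totals.keys.length := by
      simp [PySem.Dict.size, PySem.Dict.keys]
    simp only [this, beq_eq_false_iff_ne, ne_eq, List.length_eq_zero_iff]
    exact hkeysne
  rw [hsize]
  simp only [hsrc, List.isEmpty_cons, Bool.false_eq_true, if_false]
  rw [← hsrc]
  set l := PySem.List.sorted src (fun r => r.2.1) false with hl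
  have hperm : l.Perm src := PySem.List.sorted_perm ..
  have hpw : l.Pairwise (fun a b => a.2.1 ≤ b.2.1) := PySem.List.sorted_pairwise ..
  rw [pvGroupParts_eq hpw, hkeys, pvKeys_eq_sorted]
  refine congrArg _ (List.map_congr_left ?_)
  intro k hk
  have : totals.getD k 0 = pvTot src k := by
    rw [htotals, totals_getD]
    simp
  rw [this, pvTot_perm hperm]
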